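-- pv_equiv track=rewrite | github.com/Geethanjali-17/expense-console | backend/main.py | _prev_months
-- ===== SOURCE A (Python) =====
-- def _prev_months(year: int, month: int, n: int) -> list[tuple[int, int]]:
--     """Return (year, month) tuples for the *n* months before (year, month)."""
--     result = []
--     for i in range(1, n + 1):
--         m = month - i
--         y = year
--         while m <= 0:
--             m += 12
--             y -= 1
--         result.append((y, m))
--     return result
-- ===== SOURCE B (Python) =====
-- def _prev_months(year: int, month: int, n: int) -> list[tuple[int, int]]:
--     """Return (year, month) tuples for the *n* months before (year, month)."""
--     def norm(m):
--         if m <= 0: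
--             q, r = divmod(m - 1, 12)
--             return (year + q, r + 1)
--         return (year, m)
--     return [norm(month - i) for i in range(1, n + 1)]
-- ===== Notes on version B (the rewrite author's own statement) =====
-- stated objective: alternative
-- what changed: replaces the inner 'while m <= 0: m += 12; y -= 1' normalisation loop by a single closed-form divmod computation and builds the result as a comprehension instead of append-in-a-loop
import Mathlib
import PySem

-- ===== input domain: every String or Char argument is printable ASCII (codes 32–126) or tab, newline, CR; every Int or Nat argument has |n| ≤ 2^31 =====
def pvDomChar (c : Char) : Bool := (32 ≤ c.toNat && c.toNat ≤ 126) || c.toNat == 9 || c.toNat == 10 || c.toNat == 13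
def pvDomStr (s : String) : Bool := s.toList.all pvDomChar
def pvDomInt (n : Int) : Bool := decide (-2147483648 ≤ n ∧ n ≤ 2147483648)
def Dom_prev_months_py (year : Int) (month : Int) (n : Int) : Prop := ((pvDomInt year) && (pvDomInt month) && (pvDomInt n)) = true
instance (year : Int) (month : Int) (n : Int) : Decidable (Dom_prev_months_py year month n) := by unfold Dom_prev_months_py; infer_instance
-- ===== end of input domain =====

-- B replaces A's inner `while m <= 0` normalisation loop by one closed-form divmod
-- computation per month and builds the list as a comprehension (objective: alternative).

-- ===== PORT A =====
-- the `while m <= 0: m += 12; y -= 1` loop of A, verbatim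
def pvNormLoop (y m : Int) : Int × Int :=
  if m ≤ 0 then pvNormLoop (y - 1) (m + 12) else (y, m)
termination_by (1 - m).toNat
decreasing_by omega

def prev_months_py (year : Int) (month : Int) (n : Int) : List (Int × Int) :=
  (PySem.List.pyRange 1 (n + 1) 1).foldl
    (fun result i =>
      let m := month - i
      let y := year
      let ym := pvNormLoop y m
      result ++ [ym]) []

-- ===== PORT B =====
def prev_months_py_alt (year : Int) (month : Int) (n : Int) : List (Int × Int) :=
  (PySem.List.pyRange 1 (n + 1) 1).map (fun i =>
    let m := month - i
    if m ≤ 0 then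
      let q := PySem.Int.floordiv (m - 1) 12
      let r := PySem.Int.mod (m - 1) 12
      (year + q, r + 1)
    else (year, m))

-- ===== PRECONDITION & SPEC =====
def Spec_prev_months_py (year : Int) (month : Int) (n : Int) (out : List (Int × Int)) : Prop := out = prev_months_py_alt year month n
instance (year : Int) (month : Int) (n : Int) (out : List (Int × Int)) : Decidable (Spec_prev_months_py year month n out) := by unfold Spec_prev_months_py; infer_instance

-- ===== CLAIM (what is proved, stated in full; the proofs are below) =====
def Claim_equal_prev_months_py : Prop := ∀ (year : Int) (month : Int) (n : Int), Dom_prev_months_py year month n → Spec_prev_months_py year month n (prev_months_py year month n)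

-- ===== LEMMAS AND PROOFS =====

-- A's while loop computes B's closed form
theorem pvNormLoop_eq (y m : Int) :
    pvNormLoop y m =
      if m ≤ 0 then (y + PySem.Int.floordiv (m - 1) 12, PySem.Int.mod (m - 1) 12 + 1)
      else (y, m) := by
  induction y, m using pvNormLoop.induct with
  | case1 y m h ih =>
    rw [pvNormLoop, if_pos h, ih]
    have hq : PySem.Int.floordiv (m + 12 - 1) 12 = PySem.Int.floordiv (m - 1) 12 + 1 := by
      have := PySem.Int.floordiv_mul_add_mod (m - 1) 12
      have := PySem.Int.floordiv_mul_add_mod (m + 12 - 1) 12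
      have h1 := PySem.Int.mod_nonneg (m - 1) (by norm_num : (0:Int) < 12)
      have h2 := PySem.Int.mod_lt (m - 1) (by norm_num : (0:Int) < 12)
      have h3 := PySem.Int.mod_nonneg (m + 12 - 1) (by norm_num : (0:Int) < 12)
      have h4 := PySem.Int.mod_lt (m + 12 - 1) (by norm_num : (0:Int) < 12)
      omega
    have hr : PySem.Int.mod (m + 12 - 1) 12 = PySem.Int.mod (m - 1) 12 := by
      have := PySem.Int.floordiv_mul_add_mod (m - 1) 12
      have := PySem.Int.floordiv_mul_add_mod (m + 12 - 1) 12
      have h1 := PySem.Int.mod_nonneg (m - 1) (by norm_num : (0:Int) < 12)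
      have h2 := PySem.Int.mod_lt (m - 1) (by norm_num : (0:Int) < 12)
      have h3 := PySem.Int.mod_nonneg (m + 12 - 1) (by norm_num : (0:Int) < 12)
      have h4 := PySem.Int.mod_lt (m + 12 - 1) (by norm_num : (0:Int) < 12)
      omega
    by_cases h' : m + 12 ≤ 0
    · simp only [if_pos h', hq, hr, if_pos h]
      exact Prod.ext (by ring) rfl
    · simp only [if_neg h']
      have hq0 : PySem.Int.floordiv (m - 1) 12 = -1 := by
        have := PySem.Int.floordiv_mul_add_mod (m - 1) 12
        have h1 := PySem.Int.mod_nonneg (m - 1) (by norm_num : (0:Int) < 12)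
        have h2 := PySem.Int.mod_lt (m - 1) (by norm_num : (0:Int) < 12)
        omega
      have hr0 : PySem.Int.mod (m - 1) 12 = m + 11 := by
        have := PySem.Int.floordiv_mul_add_mod (m - 1) 12
        omega
      rw [if_pos h, hq0, hr0]
      exact Prod.ext (by ring) (by ring)
  | case2 y m h =>
    rw [pvNormLoop, if_neg h, if_neg h]

theorem pv_foldl_append_map {α β : Type} (f : α → β) :
    ∀ (l : List α) (acc : List β),
      l.foldl (fun r i => r ++ [f i]) acc = acc ++ l.map f := by
  intro l
  induction l with
  | nil => intro acc; simp
  | cons x xs ih => intro acc; simp [List.foldl, ih]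

-- ===== VERDICT (by name: the statement is the Claim_ definition above) =====
theorem prev_months_py_spec : Claim_equal_prev_months_py := by
  intro year month n _
  unfold Spec_prev_months_py prev_months_py prev_months_py_alt
  rw [pv_foldl_append_map]
  simp only [List.nil_append]
  apply List.map_congr_left
  intro i _
  rw [pvNormLoop_eq]
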